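-- pv_equiv track=rewrite | github.com/MzudemO/chapter-segmentation | utils.py | take_sentences_from_start
-- ===== SOURCE A (Python) =====
-- from typing import List
--
-- SENTENCE_SEP_TOKENS = [".", "!", "?"]
--
-- def take_sentences_from_start(paragraph: List[str], length: int) -> List[str]:
--     output = paragraph[:length]
--     period_indices = [
--         index for index, token in enumerate(output) if token in SENTENCE_SEP_TOKENS
--     ]
--     if length >= len(paragraph):
--         period_indices = period_indices[
--             :-1
--         ]  # the paragraph ends on a sentence separator
--     if period_indices == []:
--         return output
--     else:
--         return output[: period_indices[-1]]
-- ===== SOURCE B (Python) =====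
-- from typing import List
--
-- SENTENCE_SEP_TOKENS = [".", "!", "?"]
--
-- def take_sentences_from_start(paragraph: List[str], length: int) -> List[str]:
--     output = paragraph[:length]
--     # number of trailing separators to skip before cutting
--     need = 1 if length >= len(paragraph) else 0
--     for i in range(len(output) - 1, -1, -1):
--         if output[i] in SENTENCE_SEP_TOKENS:
--             if need == 0:
--                 return output[:i]
--             need -= 1
--     return output
-- ===== Notes on version B (the rewrite author's own statement) =====
-- stated objective: alternative
-- what changed: A builds the full list of all separator indices with a forward enumerate-comprehension and then slices it; B does one backward scan over the truncated list and returns at the first (or, when length >= len(paragraph), second) separator it meets, keeping only a skip counter.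
import Mathlib
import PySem

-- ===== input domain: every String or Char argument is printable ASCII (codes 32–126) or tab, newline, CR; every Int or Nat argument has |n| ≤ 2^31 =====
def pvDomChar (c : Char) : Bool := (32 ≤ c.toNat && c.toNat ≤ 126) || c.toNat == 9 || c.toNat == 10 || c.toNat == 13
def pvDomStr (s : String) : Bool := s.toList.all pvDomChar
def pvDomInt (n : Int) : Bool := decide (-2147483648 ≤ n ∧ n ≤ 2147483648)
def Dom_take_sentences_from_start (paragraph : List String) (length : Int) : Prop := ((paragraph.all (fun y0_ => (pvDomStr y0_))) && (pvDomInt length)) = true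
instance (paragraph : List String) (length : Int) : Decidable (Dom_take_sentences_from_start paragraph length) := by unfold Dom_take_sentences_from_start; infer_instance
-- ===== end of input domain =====

-- B replaces A's full forward index-list construction by a single backward scan that
-- stops at the first needed separator (objective: alternative decomposition, same O(n)).

-- ===== PORT A =====
def SENTENCE_SEP_TOKENS : List String := [".", "!", "?"]

def take_sentences_from_start (paragraph : List String) (length : Int) : List String :=
  let output := PySem.List.slice paragraph none (some length)
  let period_indices : List Int :=
    (PySem.List.enumerate output 0).foldr
      (fun p acc => if p.2 ∈ SENTENCE_SEP_TOKENS then p.1 :: acc else acc) []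
  let period_indices :=
    if length ≥ (paragraph.length : Int)
    then PySem.List.slice period_indices none (some (-1))  -- period_indices[:-1]
    else period_indices
  if period_indices = [] then output
  else PySem.List.slice output none (some (PySem.List.pyGetD period_indices (-1) 0))

-- ===== PORT B =====
-- the backward for-loop of Source B: `rev` is the not-yet-visited part of output reversed,
-- so the current element output[i] has i = rest.length
def tsfsGoB (output : List String) (rev : List String) (need : Nat) : List String :=
  match rev with
  | [] => output
  | t :: rest =>
    if t ∈ SENTENCE_SEP_TOKENS then
      if need = 0 then output.take rest.length
      else tsfsGoB output rest (need - 1)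
    else tsfsGoB output rest need

def take_sentences_from_start_alt (paragraph : List String) (length : Int) : List String :=
  let output := PySem.List.slice paragraph none (some length)
  let need : Nat := if length ≥ (paragraph.length : Int) then 1 else 0
  tsfsGoB output output.reverse need

-- ===== PRECONDITION & SPEC =====
def Spec_take_sentences_from_start (paragraph : List String) (length : Int) (out : List String) : Prop := out = take_sentences_from_start_alt paragraph length
instance (paragraph : List String) (length : Int) (out : List String) : Decidable (Spec_take_sentences_from_start paragraph length out) := by unfold Spec_take_sentences_from_start; infer_instance

-- ===== CLAIM (what is proved, stated in full; the proofs are below) =====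
def Claim_equal_take_sentences_from_start : Prop := ∀ (paragraph : List String) (length : Int), Dom_take_sentences_from_start paragraph length → Spec_take_sentences_from_start paragraph length (take_sentences_from_start paragraph length)

-- ===== LEMMAS AND PROOFS =====

-- the list of separator indices A builds, as a filterMap
def tsfsIdx (out : List String) : List Int :=
  (PySem.List.enumerate out 0).filterMap
    (fun p => if p.2 ∈ SENTENCE_SEP_TOKENS then some p.1 else none)

theorem tsfsIdx_eq_foldr (out : List String) :
    (PySem.List.enumerate out 0).foldr
      (fun p acc => if p.2 ∈ SENTENCE_SEP_TOKENS then p.1 :: acc else acc) [] = tsfsIdx out := by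
  unfold tsfsIdx
  induction PySem.List.enumerate out 0 with
  | nil => rfl
  | cons a l ih => by_cases h : a.2 ∈ SENTENCE_SEP_TOKENS <;> simp [h, ih]

theorem tsfsIdx_append (ys : List String) (t : String) :
    tsfsIdx (ys ++ [t]) =
      tsfsIdx ys ++ (if t ∈ SENTENCE_SEP_TOKENS then [(ys.length : Int)] else []) := by
  unfold tsfsIdx
  rw [PySem.List.enumerate_append]
  rw [List.filterMap_append]
  by_cases h : t ∈ SENTENCE_SEP_TOKENS <;>
    simp [PySem.List.enumerate_cons, PySem.List.enumerate_nil, h]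

theorem tsfsIdx_nonneg (out : List String) : ∀ i ∈ tsfsIdx out, 0 ≤ i := by
  intro i hi
  unfold tsfsIdx at hi
  rw [List.mem_filterMap] at hi
  obtain ⟨p, hp, hgp⟩ := hi
  rw [PySem.List.mem_enumerate_iff] at hp
  obtain ⟨k, hk, rfl⟩ := hp
  split at hgp
  · have := Option.some.inj hgp; omega
  · exact absurd hgp (by simp)

theorem tsfsGoB_spec (O : List String) (out : List String) (need : Nat) :
    tsfsGoB O out.reverse need =
      match (tsfsIdx out).reverse[need]? with
      | some i => O.take i.toNat
      | none => O := by
  induction out using List.reverseRecOn generalizing need with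
  | nil => simp [tsfsGoB, tsfsIdx, PySem.List.enumerate_nil]
  | append_singleton ys t ih =>
    have hrev : (ys ++ [t]).reverse = t :: ys.reverse := by simp
    rw [tsfsIdx_append, hrev]
    unfold tsfsGoB
    by_cases h : t ∈ SENTENCE_SEP_TOKENS
    · simp only [h, if_pos, List.reverse_append, List.reverse_cons, List.reverse_nil,
        List.nil_append, List.singleton_append]
      cases need with
      | zero => simp
      | succ n => simpa using ih n
    · simp only [h, if_neg, not_false_iff, List.append_nil]
      exact ih need

theorem tsfs_reverse_zero (l : List Int) : l.reverse[0]? = l.getLast? := by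
  simp [← List.head?_reverse, List.head?_eq_getElem?]

theorem tsfs_reverse_one (l : List Int) : l.reverse[1]? = l.dropLast.getLast? := by
  induction l using List.reverseRecOn with
  | nil => simp
  | append_singleton ys a ih => simp [← List.head?_reverse, List.head?_eq_getElem?]

-- ===== VERDICT (by name: the statement is the Claim_ definition above) =====
theorem take_sentences_from_start_spec : Claim_equal_take_sentences_from_start := by
  intro paragraph length _
  unfold Spec_take_sentences_from_start take_sentences_from_start take_sentences_from_start_alt
  simp only [tsfsIdx_eq_foldr]
  set output := PySem.List.slice paragraph none (some length) with hout
  rw [tsfsGoB_spec]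
  by_cases hlen : length ≥ (paragraph.length : Int)
  · simp only [hlen, if_pos, PySem.List.slice_to_neg_one, tsfs_reverse_one]
    cases hL : (tsfsIdx output).dropLast.getLast? with
    | none => simp [List.getLast?_eq_none_iff.mp hL]
    | some i =>
      have hne : (tsfsIdx output).dropLast ≠ [] := by
        intro h; rw [h] at hL; simp at hL
      have hgl : (tsfsIdx output).dropLast.getLast hne = i := by
        rw [List.getLast?_eq_some_getLast hne] at hL; exact Option.some.inj hL
      have hnn : 0 ≤ i := tsfsIdx_nonneg output i
        (by rw [← hgl]; exact List.dropLast_subset _ (List.getLast_mem hne))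
      simp only [hne, if_neg, not_false_iff]
      rw [PySem.List.pyGetD_neg_one _ _ hne, hgl, PySem.List.slice_to _ hnn]
  · simp only [hlen, if_neg, not_false_iff, tsfs_reverse_zero]
    cases hL : (tsfsIdx output).getLast? with
    | none => simp [List.getLast?_eq_none_iff.mp hL]
    | some i =>
      have hne : tsfsIdx output ≠ [] := by
        intro h; rw [h] at hL; simp at hL
      have hgl : (tsfsIdx output).getLast hne = i := by
        rw [List.getLast?_eq_some_getLast hne] at hL; exact Option.some.inj hL
      have hnn : 0 ≤ i := tsfsIdx_nonneg output i (hgl ▸ List.getLast_mem hne)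
      simp only [hne, if_neg, not_false_iff]
      rw [PySem.List.pyGetD_neg_one _ _ hne, hgl, PySem.List.slice_to _ hnn]
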